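-- pv_equiv track=rewrite | github.com/p10rahulm/brandyz-reco | Exploratory.py | get_user_purchase_deets
-- ===== SOURCE A (Python) =====
-- def get_user_purchase_deets(shoppers,num_uniq_shoppers,brands):
--     # we shall get deets: total_num_transactions, start_row, end_row, brands as a list
--     # add more if you find more
--     user_deets = []
--     end_row = 0
--     total_transactions = len(shoppers)
--     while end_row < total_transactions:
--         num_transactions = 0
--         transactions_list = []
--         start_row = end_row
--         start_user = shoppers[start_row]
--         while(end_row < total_transactions and shoppers[end_row] == start_user):
--             num_transactions+=1
--             transactions_list.append(brands[end_row])
--             end_row+=1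
--         user_deets.append((num_transactions,start_row,end_row,transactions_list))
--     return user_deets
-- ===== SOURCE B (Python) =====
-- def get_user_purchase_deets(shoppers, num_uniq_shoppers, brands):
--     if not shoppers:
--         return []
--     # pass 1: boundary table of run starts, plus final sentinel
--     bounds = [0]
--     for i in range(1, len(shoppers)):
--         if shoppers[i] != shoppers[i - 1]:
--             bounds.append(i)
--     bounds.append(len(shoppers))
--     # pass 2: one record per consecutive boundary pair
--     return [(end - start, start, end, brands[start:end])
--             for start, end in zip(bounds, bounds[1:])]
-- ===== Notes on version B (the rewrite author's own statement) =====
-- stated objective: alternative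
-- what changed: Replaces the nested cursor while-loops with two flat passes: first build a boundary table of run starts, then emit one record per consecutive boundary pair using a slice of brands; Pre_ excludes inputs where A raises IndexError (brands shorter than shoppers).
import Mathlib
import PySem

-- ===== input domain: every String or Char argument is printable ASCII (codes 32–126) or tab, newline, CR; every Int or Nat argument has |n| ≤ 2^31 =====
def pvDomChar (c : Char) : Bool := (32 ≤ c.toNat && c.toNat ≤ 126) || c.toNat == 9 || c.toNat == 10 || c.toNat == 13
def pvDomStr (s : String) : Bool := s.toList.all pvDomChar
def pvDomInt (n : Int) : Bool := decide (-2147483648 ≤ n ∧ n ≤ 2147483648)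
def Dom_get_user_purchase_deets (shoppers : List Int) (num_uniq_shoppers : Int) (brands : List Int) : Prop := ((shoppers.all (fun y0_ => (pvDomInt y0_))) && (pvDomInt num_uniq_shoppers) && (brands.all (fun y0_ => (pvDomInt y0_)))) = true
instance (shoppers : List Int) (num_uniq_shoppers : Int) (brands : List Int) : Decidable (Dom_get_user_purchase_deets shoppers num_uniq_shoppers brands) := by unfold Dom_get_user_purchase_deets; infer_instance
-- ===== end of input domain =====

-- B replaces A's nested cursor while-loops by two flat passes (a boundary table of run
-- starts, then one record per consecutive boundary pair, slicing brands); objective: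
-- alternative decomposition, same O(n) cost. Equality is claimed for the return value
-- (neither program mutates its arguments).

-- ===== PORT A =====
-- inner while loop of A: state (num_transactions, transactions_list, end_row); the fuel
-- argument only makes the recursion structural (len(shoppers) is always enough, so the
-- loop always stops on its own condition, as in Python).
-- brands[end_row] is ported as brands.getD e 0: exact whenever end_row < len(brands),
-- i.e. on all of Pre_ (outside Pre_ the Python raises IndexError).
def pvInner (shoppers brands : List Int) (su : Int) :
    Nat → Int → List Int → Nat → Int × List Int × Nat
  | 0, num, tl, e => (num, tl, e)
  | fuel + 1, num, tl, e =>
    if e < shoppers.length ∧ shoppers.getD e 0 = su then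
      pvInner shoppers brands su fuel (num + 1) (tl ++ [brands.getD e 0]) (e + 1)
    else (num, tl, e)

-- outer while loop of A, accumulating user_deets (fuel as above)
def pvOuter (shoppers brands : List Int) :
    Nat → List (Int × Int × Int × List Int) → Nat → List (Int × Int × Int × List Int)
  | 0, acc, _ => acc
  | fuel + 1, acc, e =>
    if e < shoppers.length then
      let r := pvInner shoppers brands (shoppers.getD e 0) shoppers.length 0 [] e
      pvOuter shoppers brands fuel (acc ++ [(r.1, (e : Int), (r.2.2 : Int), r.2.1)]) r.2.2
    else acc

def get_user_purchase_deets (shoppers : List Int) (num_uniq_shoppers : Int) (brands : List Int) :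
    List (Int × Int × Int × List Int) :=
  pvOuter shoppers brands shoppers.length [] 0

-- ===== PORT B =====
def get_user_purchase_deets_alt (shoppers : List Int) (num_uniq_shoppers : Int) (brands : List Int) :
    List (Int × Int × Int × List Int) :=
  if shoppers.isEmpty then []
  else
    -- pass 1: bounds = [0] ++ [i in range(1,len) with shoppers[i] != shoppers[i-1]] ++ [len]
    let bounds : List Nat :=
      0 :: (((List.range' 1 (shoppers.length - 1)).filter
              (fun i => shoppers.getD i 0 != shoppers.getD (i - 1) 0)) ++ [shoppers.length])
    -- pass 2: one record per pair of zip(bounds, bounds[1:])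
    (bounds.zip (bounds.drop 1)).map
      (fun p => ((p.2 : Int) - (p.1 : Int), (p.1 : Int), (p.2 : Int),
                 PySem.List.slice brands (some (p.1 : Int)) (some (p.2 : Int))))

-- ===== PRECONDITION & SPEC =====
-- Pre_ excludes exactly the inputs where Python A raises IndexError (brands shorter
-- than shoppers); A returns normally on every input satisfying Pre_.
def Pre_get_user_purchase_deets (shoppers : List Int) (num_uniq_shoppers : Int) (brands : List Int) : Prop :=
  shoppers.length ≤ brands.length
instance (shoppers : List Int) (num_uniq_shoppers : Int) (brands : List Int) :
    Decidable (Pre_get_user_purchase_deets shoppers num_uniq_shoppers brands) := by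
  unfold Pre_get_user_purchase_deets; infer_instance

def pvWitness_get_user_purchase_deets : List Int × Int × List Int := ([1, 1, 2], 2, [10, 20, 30])

def Spec_get_user_purchase_deets (shoppers : List Int) (num_uniq_shoppers : Int) (brands : List Int)
    (out : List (Int × Int × Int × List Int)) : Prop :=
  out = get_user_purchase_deets_alt shoppers num_uniq_shoppers brands
instance (shoppers : List Int) (num_uniq_shoppers : Int) (brands : List Int)
    (out : List (Int × Int × Int × List Int)) :
    Decidable (Spec_get_user_purchase_deets shoppers num_uniq_shoppers brands out) := by
  unfold Spec_get_user_purchase_deets; infer_instance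

-- ===== CLAIM (what is proved, stated in full; the proofs are below) =====
def Claim_equal_get_user_purchase_deets : Prop := ∀ (shoppers : List Int) (num_uniq_shoppers : Int) (brands : List Int), Dom_get_user_purchase_deets shoppers num_uniq_shoppers brands → Pre_get_user_purchase_deets shoppers num_uniq_shoppers brands → Spec_get_user_purchase_deets shoppers num_uniq_shoppers brands (get_user_purchase_deets shoppers num_uniq_shoppers brands)


-- ===== LEMMAS AND PROOFS =====

-- pvNxt su e = the first index j >= e with j = len or shoppers[j] != su (A's inner-loop stop point)
def pvNxt (shoppers : List Int) (su : Int) (e : Nat) : Nat :=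
  if h : e < shoppers.length ∧ shoppers.getD e 0 = su then pvNxt shoppers su (e + 1) else e
termination_by shoppers.length - e
decreasing_by omega

theorem pvNxt_le (shoppers : List Int) (su : Int) (e : Nat) : e ≤ pvNxt shoppers su e := by
  fun_induction pvNxt with
  | case1 e h ih => omega
  | case2 e h => omega

theorem pvNxt_le_len (shoppers : List Int) (su : Int) (e : Nat) :
    e ≤ shoppers.length → pvNxt shoppers su e ≤ shoppers.length := by
  fun_induction pvNxt with
  | case1 e h ih => intro _; exact ih (by omega)
  | case2 e h => intro he; omega

theorem pvNxt_lt (shoppers : List Int) (su : Int) (e : Nat) (h1 : e < shoppers.length)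
    (h2 : shoppers.getD e 0 = su) : e < pvNxt shoppers su e := by
  rw [pvNxt, dif_pos ⟨h1, h2⟩]
  have := pvNxt_le shoppers su (e + 1); omega

theorem pvNxt_mem (shoppers : List Int) (su : Int) (e : Nat) :
    ∀ i, e ≤ i → i < pvNxt shoppers su e → shoppers.getD i 0 = su := by
  fun_induction pvNxt with
  | case1 e h ih =>
    intro i h1 h2
    rcases Nat.eq_or_lt_of_le h1 with rfl | h1
    · exact h.2
    · exact ih i h1 h2
  | case2 e h => intro i h1 h2; omega

theorem pvNxt_stop (shoppers : List Int) (su : Int) (e : Nat)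
    (h : pvNxt shoppers su e < shoppers.length) :
    ¬ shoppers.getD (pvNxt shoppers su e) 0 = su := by
  fun_induction pvNxt with
  | case1 e _ ih => exact ih h
  | case2 e hc => intro hs; exact hc ⟨h, hs⟩

-- the inner loop, characterised through pvNxt (any sufficient fuel)
theorem pvInner_eq (shoppers brands : List Int) (su : Int) (fuel : Nat) :
    ∀ (num : Int) (tl : List Int) (e : Nat), shoppers.length - e ≤ fuel →
    pvInner shoppers brands su fuel num tl e =
      (num + ((pvNxt shoppers su e - e : Nat) : Int),
       tl ++ (List.range' e (pvNxt shoppers su e - e)).map (fun i => brands.getD i 0),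
       pvNxt shoppers su e) := by
  induction fuel with
  | zero =>
    intro num tl e hf
    have he : ¬ (e < shoppers.length ∧ shoppers.getD e 0 = su) := by
      intro hc; omega
    rw [pvNxt, dif_neg he]
    simp [pvInner]
  | succ fuel ih =>
    intro num tl e hf
    rw [pvInner]
    by_cases h : e < shoppers.length ∧ shoppers.getD e 0 = su
    · rw [if_pos h, pvNxt, dif_pos h, ih (num + 1) (tl ++ [brands.getD e 0]) (e + 1) (by omega)]
      have h1 : e + 1 ≤ pvNxt shoppers su (e + 1) := pvNxt_le shoppers su (e + 1)
      refine Prod.ext ?_ (Prod.ext ?_ rfl)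
      · show num + 1 + _ = num + _
        omega
      · show tl ++ [brands.getD e 0] ++ _ = tl ++ _
        have h2 : pvNxt shoppers su (e + 1) - e = (pvNxt shoppers su (e + 1) - (e + 1)) + 1 := by
          omega
        rw [h2, List.range'_succ, List.map_cons, List.append_assoc]
        simp
    · rw [if_neg h, pvNxt, dif_neg h]
      simp

-- chain of (run start, run end) pairs, as A's outer loop visits them
def pvChain (shoppers : List Int) (e : Nat) : List (Nat × Nat) :=
  if h : e < shoppers.length then
    (e, pvNxt shoppers (shoppers.getD e 0) e) :: pvChain shoppers (pvNxt shoppers (shoppers.getD e 0) e)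
  else []
termination_by shoppers.length - e
decreasing_by
  have := pvNxt_lt shoppers (shoppers.getD e 0) e h rfl
  omega

theorem pvChain_mem (shoppers : List Int) (e : Nat) :
    e ≤ shoppers.length → ∀ p ∈ pvChain shoppers e, p.1 ≤ p.2 ∧ p.2 ≤ shoppers.length := by
  fun_induction pvChain with
  | case1 e h ih =>
    intro _ p hp
    have hle := pvNxt_le shoppers (shoppers.getD e 0) e
    have hlen := pvNxt_le_len shoppers (shoppers.getD e 0) e (by omega)
    rcases List.mem_cons.mp hp with rfl | hp
    · exact ⟨hle, hlen⟩
    · exact ih hlen p hp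
  | case2 e h => intro _ p hp; simp at hp

-- A's outer loop produces exactly the chain, mapped to records (any sufficient fuel)
theorem pvOuter_eq (shoppers brands : List Int) (fuel : Nat) :
    ∀ (acc : List (Int × Int × Int × List Int)) (e : Nat), shoppers.length - e ≤ fuel →
    pvOuter shoppers brands fuel acc e =
      acc ++ (pvChain shoppers e).map
        (fun p => (((p.2 - p.1 : Nat) : Int), (p.1 : Int), (p.2 : Int),
                   (List.range' p.1 (p.2 - p.1)).map (fun i => brands.getD i 0))) := by
  induction fuel with
  | zero =>
    intro acc e hf
    rw [pvChain, dif_neg (by omega)]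
    simp [pvOuter]
  | succ fuel ih =>
    intro acc e hf
    rw [pvOuter, pvChain]
    by_cases h : e < shoppers.length
    · rw [if_pos h, dif_pos h]
      have hlt : e < pvNxt shoppers (shoppers.getD e 0) e := pvNxt_lt shoppers _ e h rfl
      rw [pvInner_eq shoppers brands _ shoppers.length 0 [] e (by omega)]
      rw [ih _ _ (by change shoppers.length - pvNxt shoppers (shoppers.getD e 0) e ≤ fuel; omega)]
      simp
    · rw [if_neg h, dif_neg h]
      simp

-- filtered change points after a run start: nothing up to the run end, then the run end itself
theorem pvFilter_split (shoppers : List Int) (s : Nat) (hs : s < shoppers.length)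
    (j : Nat) (hj : j = pvNxt shoppers (shoppers.getD s 0) s) :
    (List.range' (s + 1) (shoppers.length - 1 - s)).filter
        (fun i => shoppers.getD i 0 != shoppers.getD (i - 1) 0) =
      if j < shoppers.length then
        j :: (List.range' (j + 1) (shoppers.length - 1 - j)).filter
              (fun i => shoppers.getD i 0 != shoppers.getD (i - 1) 0)
      else [] := by
  have hsj : s < j := hj ▸ pvNxt_lt shoppers (shoppers.getD s 0) s hs rfl
  have hjL : j ≤ shoppers.length := hj ▸ pvNxt_le_len shoppers (shoppers.getD s 0) s (by omega)
  have hmem : ∀ i, s ≤ i → i < j → shoppers.getD i 0 = shoppers.getD s 0 := by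
    intro i h1 h2
    exact pvNxt_mem shoppers (shoppers.getD s 0) s i h1 (hj ▸ h2)
  have hsplit : List.range' (s + 1) (shoppers.length - 1 - s) =
      List.range' (s + 1) (j - s - 1) ++ List.range' j (shoppers.length - j) := by
    conv_lhs => rw [show shoppers.length - 1 - s = (j - s - 1) + (shoppers.length - j) by omega]
    have hstart : List.range' j (shoppers.length - j) =
        List.range' ((s + 1) + (j - s - 1)) (shoppers.length - j) := by
      rw [show (s + 1) + (j - s - 1) = j from by omega]
    rw [hstart, List.range'_append_1]
  rw [hsplit, List.filter_append]
  have hfirst : (List.range' (s + 1) (j - s - 1)).filter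
      (fun i => shoppers.getD i 0 != shoppers.getD (i - 1) 0) = [] := by
    rw [List.filter_eq_nil_iff]
    intro i hi
    rw [List.mem_range'_1] at hi
    have e1 : shoppers.getD i 0 = shoppers.getD s 0 := hmem i (by omega) (by omega)
    have e2 : shoppers.getD (i - 1) 0 = shoppers.getD s 0 := hmem (i - 1) (by omega) (by omega)
    rw [e1, e2]
    simp
  rw [hfirst, List.nil_append]
  by_cases hjlt : j < shoppers.length
  · simp only [hjlt, if_true]
    have hcnt : shoppers.length - j = (shoppers.length - 1 - j) + 1 := by omega
    rw [hcnt, List.range'_succ, List.filter_cons]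
    have e2 : shoppers.getD (j - 1) 0 = shoppers.getD s 0 := hmem (j - 1) (by omega) (by omega)
    have e1 : ¬ shoppers.getD j 0 = shoppers.getD s 0 :=
      hj ▸ pvNxt_stop shoppers (shoppers.getD s 0) s (hj ▸ hjlt)
    have hpred : (shoppers.getD j 0 != shoppers.getD (j - 1) 0) = true := by
      rw [e2]; exact bne_iff_ne.mpr e1
    simp only [hpred, if_true]
  · simp only [hjlt, if_false]
    have hz : shoppers.length - j = 0 := by omega
    rw [hz]
    simp

-- B's boundary pairs are exactly the chain
theorem pvPairs_eq (shoppers : List Int) (s : Nat) :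
    s < shoppers.length →
    ((s :: (((List.range' (s + 1) (shoppers.length - 1 - s)).filter
          (fun i => shoppers.getD i 0 != shoppers.getD (i - 1) 0)) ++ [shoppers.length])).zip
      ((((List.range' (s + 1) (shoppers.length - 1 - s)).filter
          (fun i => shoppers.getD i 0 != shoppers.getD (i - 1) 0)) ++ [shoppers.length]))) =
      pvChain shoppers s := by
  fun_induction pvChain shoppers s with
  | case1 s h ih =>
    intro _
    rw [pvFilter_split shoppers s h _ rfl]
    by_cases hjlt : pvNxt shoppers (shoppers.getD s 0) s < shoppers.length
    · simp only [hjlt, if_true, List.cons_append, List.zip_cons_cons]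
      congr 1
      exact ih hjlt
    · simp only [hjlt, if_false]
      have hj : pvNxt shoppers (shoppers.getD s 0) s = shoppers.length := by
        have := pvNxt_le_len shoppers (shoppers.getD s 0) s (by omega); omega
      rw [pvChain]
      simp only [hjlt, dite_false]
      rw [hj]
      simp [List.zip]
  | case2 s h => intro hs; omega

-- segment of brands via slice equals the element-wise collection of A's inner loop
theorem pvSlice_eq (brands : List Int) (s n : Nat) (h : s + n ≤ brands.length) :
    PySem.List.slice brands (some (s : Int)) (some ((s + n : Nat) : Int)) =
      (List.range' s n).map (fun i => brands.getD i 0) := by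
  rw [PySem.List.slice_natCast]
  rw [show s + n - s = n by omega]
  apply List.ext_getElem
  · simp; omega
  · intro i h1 h2
    simp only [List.length_take, List.length_drop] at h1
    simp only [List.getElem_take, List.getElem_drop, List.getElem_map, List.getElem_range', one_mul]
    rw [List.getD_eq_getElem _ _ (by omega)]

-- ===== VERDICT (by name: the statement is the Claim_ definition above) =====
theorem get_user_purchase_deets_spec : Claim_equal_get_user_purchase_deets := by
  intro shoppers num_uniq_shoppers brands _ hpre
  unfold Spec_get_user_purchase_deets get_user_purchase_deets get_user_purchase_deets_alt
  rw [pvOuter_eq shoppers brands shoppers.length [] 0 (by omega)]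
  by_cases hemp : shoppers.isEmpty
  · rw [pvChain]
    have hlen : shoppers.length = 0 := by simpa [List.isEmpty_iff_length_eq_zero] using hemp
    simp [hemp, hlen]
  · simp only [hemp, List.nil_append]
    have hs : 0 < shoppers.length := by
      rcases shoppers with _ | _ <;> simp_all
    have hL : shoppers.length ≤ brands.length := hpre
    have hz := pvPairs_eq shoppers 0 hs
    simp only [Nat.sub_zero] at hz ⊢
    have hdrop : ((0 : Nat) :: (((List.range' 1 (shoppers.length - 1)).filter
          (fun i => shoppers.getD i 0 != shoppers.getD (i - 1) 0)) ++ [shoppers.length])).drop 1 =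
        (((List.range' 1 (shoppers.length - 1)).filter
          (fun i => shoppers.getD i 0 != shoppers.getD (i - 1) 0)) ++ [shoppers.length]) := by
      simp
    rw [hdrop, hz]
    apply List.map_congr_left
    intro p hp
    obtain ⟨h1, h2⟩ := pvChain_mem shoppers 0 (by omega) p hp
    have hc1 : ((p.2 - p.1 : Nat) : Int) = (p.2 : Int) - (p.1 : Int) := by
      rw [Nat.cast_sub h1]
    have hc4 : PySem.List.slice brands (some ((p.1 : Nat) : Int)) (some ((p.2 : Nat) : Int)) =
        (List.range' p.1 (p.2 - p.1)).map (fun i => brands.getD i 0) := by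
      have hsl := pvSlice_eq brands p.1 (p.2 - p.1) (by omega)
      rwa [show p.1 + (p.2 - p.1) = p.2 from by omega] at hsl
    rw [hc1, hc4]
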